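-- pv_equiv track=rewrite | github.com/BoolHak/SPBiTopology | BiTopology/Algothims/Pathfinding/beta_adic.py | cylinder_distance_fast
-- ===== SOURCE A (Python) =====
-- def cylinder_distance_fast(x1: int, y1: int, x2: int, y2: int) -> int:
--     """
--     Fast cylinder distance using integer coordinates.
--     """
--     if x1 == x2 and y1 == y2:
--         return 0
--
--     re1, im1 = x1, y1
--     re2, im2 = x2, y2
--     k = 0
--
--     while k < 100:
--         k += 1
--         d1 = (re1 & 1) ^ (im1 & 1)
--         d2 = (re2 & 1) ^ (im2 & 1)
--
--         if d1 != d2: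
--             return k
--
--         # beta_quot for both
--         if d1:
--             re1 -= 1
--             re2 -= 1
--
--         new_re1 = (im1 - re1) >> 1
--         new_im1 = -((re1 + im1) >> 1)
--         re1, im1 = new_re1, new_im1
--
--         new_re2 = (im2 - re2) >> 1
--         new_im2 = -((re2 + im2) >> 1)
--         re2, im2 = new_re2, new_im2
--
--     raise ValueError("Cylinder distance exceeded limit")
-- ===== SOURCE B (Python) =====
-- def cylinder_distance_fast(x1: int, y1: int, x2: int, y2: int) -> int:
--     """Cylinder distance via the beta-adic valuation of the DIFFERENCE point.
--
--     While the two digit streams agree, the difference (dr, di) is exactly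
--     divisible by beta = -1+i, and a digit mismatch happens precisely when
--     dr + di is odd.  So the answer is 1 + (the beta-adic valuation of the
--     difference), computed on a single two-scalar stream.
--     """
--     dr, di = x1 - x2, y1 - y2
--     if dr == 0 and di == 0:
--         return 0
--     for k in range(1, 101):
--         if (dr + di) & 1:
--             return k
--         # exact division of dr + di*i by beta = -1 + i
--         dr, di = (di - dr) >> 1, -((dr + di) >> 1)
--     raise ValueError("Cylinder distance exceeded limit")
-- ===== Notes on version B (the rewrite author's own statement) =====
-- stated objective: alternative
-- what changed: Instead of expanding both points' beta-adic digits in lockstep and comparing them, B computes the beta-adic valuation of the single difference point (x1-x2, y1-y2): while the digits agree the difference is exactly divisible by beta=-1+i, and the first mismatch happens exactly when dr+di turns odd, so half the state and no digit comparison.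
import Mathlib
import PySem

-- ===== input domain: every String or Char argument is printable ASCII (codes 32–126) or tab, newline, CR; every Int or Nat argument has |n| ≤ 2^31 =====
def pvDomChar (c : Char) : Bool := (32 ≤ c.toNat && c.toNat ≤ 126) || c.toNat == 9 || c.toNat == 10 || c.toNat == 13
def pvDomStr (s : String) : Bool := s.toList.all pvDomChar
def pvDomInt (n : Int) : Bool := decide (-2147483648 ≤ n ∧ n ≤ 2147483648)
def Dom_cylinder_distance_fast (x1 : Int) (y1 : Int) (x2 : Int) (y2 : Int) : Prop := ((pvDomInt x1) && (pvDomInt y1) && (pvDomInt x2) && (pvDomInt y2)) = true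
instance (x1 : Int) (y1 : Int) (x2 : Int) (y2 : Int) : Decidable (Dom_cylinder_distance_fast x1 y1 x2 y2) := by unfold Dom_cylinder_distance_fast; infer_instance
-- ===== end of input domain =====

-- B replaces A's lockstep comparison of two digit expansions by the beta-adic
-- valuation of the single DIFFERENCE point (dr, di) = (x1-x2, y1-y2): the first
-- digit mismatch happens exactly when dr+di turns odd (objective: alternative).
-- Both Pythons raise ValueError after 100 agreeing steps; both ports return the
-- sentinel 101 there (within Dom that branch is unreachable for distinct points).

-- ===== PORT A =====
-- the while-loop of A: fuel = 100 - k; state (re1, im1, re2, im2), counter k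
def pvLoopA : Nat → Int → Int → Int → Int → Int → Int
  | 0, _, _, _, _, _ => 101   -- raise ValueError("Cylinder distance exceeded limit")
  | n+1, re1, im1, re2, im2, k =>
    let k' := k + 1
    let d1 := PySem.Int.bxor (PySem.Int.band re1 1) (PySem.Int.band im1 1)
    let d2 := PySem.Int.bxor (PySem.Int.band re2 1) (PySem.Int.band im2 1)
    if d1 ≠ d2 then k'
    else
      let re1' := if d1 ≠ 0 then re1 - 1 else re1   -- "if d1: re1 -= 1; re2 -= 1"
      let re2' := if d1 ≠ 0 then re2 - 1 else re2
      pvLoopA n ((im1 - re1') >>> (1:Nat)) (-((re1' + im1) >>> (1:Nat)))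
                ((im2 - re2') >>> (1:Nat)) (-((re2' + im2) >>> (1:Nat))) k'

def cylinder_distance_fast (x1 : Int) (y1 : Int) (x2 : Int) (y2 : Int) : Int :=
  if x1 = x2 ∧ y1 = y2 then 0 else pvLoopA 100 x1 y1 x2 y2 0

-- ===== PORT B =====
-- B's "for k in range(1, 101)" valuation loop on the difference point (dr, di)
def pvLoopB : Nat → Int → Int → Int → Int
  | 0, _, _, _ => 101   -- raise ValueError("Cylinder distance exceeded limit")
  | n+1, dr, di, k =>
    if PySem.Int.band (dr + di) 1 ≠ 0 then k
    else pvLoopB n ((di - dr) >>> (1:Nat)) (-((dr + di) >>> (1:Nat))) (k + 1)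

def cylinder_distance_fast_alt (x1 : Int) (y1 : Int) (x2 : Int) (y2 : Int) : Int :=
  let dr := x1 - x2
  let di := y1 - y2
  if dr = 0 ∧ di = 0 then 0 else pvLoopB 100 dr di 1

-- ===== PRECONDITION & SPEC =====
def Spec_cylinder_distance_fast (x1 : Int) (y1 : Int) (x2 : Int) (y2 : Int) (out : Int) : Prop := out = cylinder_distance_fast_alt x1 y1 x2 y2
instance (x1 : Int) (y1 : Int) (x2 : Int) (y2 : Int) (out : Int) : Decidable (Spec_cylinder_distance_fast x1 y1 x2 y2 out) := by unfold Spec_cylinder_distance_fast; infer_instance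

-- ===== CLAIM =====
def Claim_equal_cylinder_distance_fast : Prop := ∀ (x1 : Int) (y1 : Int) (x2 : Int) (y2 : Int), Dom_cylinder_distance_fast x1 y1 x2 y2 → Spec_cylinder_distance_fast x1 y1 x2 y2 (cylinder_distance_fast x1 y1 x2 y2)

-- ===== LEMMAS AND PROOFS =====

-- A's interleaved loop on the two points = B's valuation loop on their difference
lemma pvLoopAB (n : Nat) : ∀ re1 im1 re2 im2 k : Int,
    pvLoopA n re1 im1 re2 im2 k = pvLoopB n (re1 - re2) (im1 - im2) (k + 1) := by
  induction n with
  | zero => intro _ _ _ _ _; rfl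
  | succ n ih =>
    intro re1 im1 re2 im2 k
    have hb : ∀ a : Int, PySem.Int.band a 1 = a % 2 := fun a => by
      rw [PySem.Int.band_one, PySem.Int.mod_eq_emod_of_pos (by norm_num)]
    have hsr : ∀ a : Int, 2 * (a >>> (1:Nat)) = a - a % 2 := fun a => by
      have h := Int.shiftRight_eq_div_pow a 1; norm_num at h; rw [h]; omega
    have bx : ∀ a b : Int, PySem.Int.bxor (a % 2) (b % 2) = (a + b) % 2 := by
      intro a b
      have b00 : PySem.Int.bxor 0 0 = 0 := by decide
      have b01 : PySem.Int.bxor 0 1 = 1 := by decide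
      have b10 : PySem.Int.bxor 1 0 = 1 := by decide
      have b11 : PySem.Int.bxor 1 1 = 0 := by decide
      rcases Int.emod_two_eq a with h | h <;> rcases Int.emod_two_eq b with h' | h' <;>
        simp only [h, h', b00, b01, b10, b11] <;> omega
    simp only [pvLoopA, pvLoopB, hb, bx]
    rcases Int.emod_two_eq (re1 + im1) with hd1 | hd1 <;>
      rcases Int.emod_two_eq (re2 + im2) with hd2 | hd2
    · -- both digits 0: both loops recurse
      have h5 : (re1 - re2 + (im1 - im2)) % 2 = 0 := by omega
      simp only [hd1, hd2, h5]
      norm_num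
      rw [ih]
      have t1 := hsr (im1 - re1); have t3 := hsr (re1 + im1)
      have t5 := hsr (im2 - re2); have t7 := hsr (re2 + im2)
      have t9 := hsr (im1 - im2 - (re1 - re2)); have t10 := hsr (re1 - re2 + (im1 - im2))
      congr 1 <;> omega
    · -- digits 0 vs 1: both return k+1
      have h5 : (re1 - re2 + (im1 - im2)) % 2 = 1 := by omega
      simp only [hd1, hd2, h5]
      norm_num
    · -- digits 1 vs 0: both return k+1
      have h5 : (re1 - re2 + (im1 - im2)) % 2 = 1 := by omega
      simp only [hd1, hd2, h5]
      norm_num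
    · -- both digits 1: subtract 1 from the real parts, then recurse
      have h5 : (re1 - re2 + (im1 - im2)) % 2 = 0 := by omega
      simp only [hd1, hd2, h5]
      norm_num
      rw [ih]
      have t2 := hsr (im1 - (re1 - 1)); have t4 := hsr (re1 - 1 + im1)
      have t6 := hsr (im2 - (re2 - 1)); have t8 := hsr (re2 - 1 + im2)
      have t9 := hsr (im1 - im2 - (re1 - re2)); have t10 := hsr (re1 - re2 + (im1 - im2))
      congr 1 <;> omega

-- ===== VERDICT =====
theorem cylinder_distance_fast_spec : Claim_equal_cylinder_distance_fast := by
  intro x1 y1 x2 y2 _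
  unfold Spec_cylinder_distance_fast cylinder_distance_fast cylinder_distance_fast_alt
  by_cases h : x1 = x2 ∧ y1 = y2
  · simp [h]
  · have h' : ¬ (x1 - x2 = 0 ∧ y1 - y2 = 0) := by
      intro hc; exact h ⟨by omega, by omega⟩
    simp only [h, h', if_false]
    simpa using pvLoopAB 100 x1 y1 x2 y2 0
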